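-- pv_equiv track=rewrite | github.com/superphy/acheron | acheron/workflows/sequence_downloader.py | download_sources
-- ===== SOURCE A (Python) =====
-- def download_sources(seq_sources):
--     """
--     Takes list of labels (including BioSamples) and list of allowed databases
--     Returns a dictionary of which database to download each sample from
--     Which looks like:
--         {database1:[SAMN01, SAMN02],
--          database2:[SAMN03],
--          database3:[SAMN04]}
--     """
--     dl_lists = {}
--     downloaded = []
--
--     # As we assign samples to a database, save it to 'downloaded' so we
--     # dont end up downloading the same sequence twice.
--     for database in seq_sources.keys():
--         for sample in seq_sources[database]:
--             if sample in downloaded: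
--                 # dont include, already attributed to a database
--                 pass
--             else:
--                 # record we are applying it to this database
--                 downloaded.append(sample)
--
--                 # assign sample to database
--                 if database not in dl_lists.keys():
--                     dl_lists[database] = []
--                 dl_lists[database].append(sample)
--
--     return dl_lists
-- ===== SOURCE B (Python) =====
-- def download_sources(seq_sources):
--     """
--     Same result as A: assign each sample to the first database that lists it,
--     then return {database: [its samples in first-seen order]}.
--     Two flat passes with dicts instead of a per-sample membership scan.
--     """
--     # Pass 1: map each sample to the first database that claims it.
--     assigned = {}
--     for database, samples in seq_sources.items():
--         for sample in samples:
--             assigned.setdefault(sample, database)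
--     # Pass 2: group samples by their assigned database, preserving order.
--     dl_lists = {}
--     for sample, database in assigned.items():
--         dl_lists.setdefault(database, []).append(sample)
--     return dl_lists
-- ===== Notes on version B (the rewrite author's own statement) =====
-- stated objective: faster
-- what changed: Replaced the single pass with a per-sample linear membership scan over the 'downloaded' list by two flat dict passes: first an assignment table sample->first database via setdefault, then a grouping pass over that table; dict lookups replace the O(n) list scan.
import Mathlib
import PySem

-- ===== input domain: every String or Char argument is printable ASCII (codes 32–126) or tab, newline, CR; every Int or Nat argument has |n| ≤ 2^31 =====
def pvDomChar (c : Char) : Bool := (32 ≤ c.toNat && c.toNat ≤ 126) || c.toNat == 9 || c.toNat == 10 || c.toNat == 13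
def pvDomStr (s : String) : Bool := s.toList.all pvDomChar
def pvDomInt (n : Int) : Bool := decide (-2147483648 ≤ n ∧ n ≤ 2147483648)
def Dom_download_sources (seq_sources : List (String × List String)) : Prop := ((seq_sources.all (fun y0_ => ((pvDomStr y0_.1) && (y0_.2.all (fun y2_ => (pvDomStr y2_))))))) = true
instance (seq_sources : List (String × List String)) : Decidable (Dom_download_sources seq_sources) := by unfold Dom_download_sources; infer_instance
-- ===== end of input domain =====

-- B replaces A's per-sample linear scan of the 'downloaded' list by two flat dict
-- passes (assignment table, then grouping); objective: faster (asymptotic).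

-- ===== PORT A =====
-- body of A's inner loop over one database's samples
def downloadStep (database : String)
    (st : PySem.Dict String (List String) × List String) (sample : String) :
    PySem.Dict String (List String) × List String :=
  if st.2.contains sample then st   -- sample in downloaded: dont include
  else
    -- record we are applying it to this database
    let downloaded := st.2 ++ [sample]
    -- if database not in dl_lists.keys(): dl_lists[database] = []
    let dl := if st.1.contains database then st.1 else st.1.insert database ([] : List String)
    -- dl_lists[database].append(sample)
    (dl.modify database [] (fun l => l ++ [sample]), downloaded)

def download_sources (seq_sources : List (String × List String)) : List (String × List String) :=
  (seq_sources.foldl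
    (fun st p => p.2.foldl (downloadStep p.1) st)
    ((PySem.Dict.empty : PySem.Dict String (List String)), ([] : List String))).1.items

-- ===== PORT B =====
-- pass 1: assigned.setdefault(sample, database) over all databases and samples
def assignPass (seq_sources : List (String × List String)) : PySem.Dict String String :=
  seq_sources.foldl
    (fun d p => p.2.foldl (fun d sample => d.setdefault sample p.1) d)
    (PySem.Dict.empty : PySem.Dict String String)

-- pass 2: dl_lists.setdefault(database, []).append(sample) over assigned.items()
def groupPass (pairs : List (String × String)) : PySem.Dict String (List String) :=
  pairs.foldl
    (fun d q => (d.setdefault q.2 ([] : List String)).modify q.2 [] (fun l => l ++ [q.1]))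
    (PySem.Dict.empty : PySem.Dict String (List String))

def download_sources_alt (seq_sources : List (String × List String)) : List (String × List String) :=
  (groupPass (assignPass seq_sources).items).items

-- ===== PRECONDITION & SPEC =====
def Spec_download_sources (seq_sources : List (String × List String)) (out : List (String × List String)) : Prop := out = download_sources_alt seq_sources
instance (seq_sources : List (String × List String)) (out : List (String × List String)) : Decidable (Spec_download_sources seq_sources out) := by unfold Spec_download_sources; infer_instance

-- ===== CLAIM (what is proved, stated in full; the proofs are below) =====
def Claim_equal_download_sources : Prop := ∀ (seq_sources : List (String × List String)), Dom_download_sources seq_sources → Spec_download_sources seq_sources (download_sources seq_sources)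

-- ===== LEMMAS AND PROOFS =====

-- the single-sample step of A, applied to the state B's assignment table induces,
-- is exactly B's setdefault step on that table
theorem step_eq (db sample : String) (a : PySem.Dict String String) :
    downloadStep db
      (groupPass a.items, a.keys) sample
    = (groupPass (a.setdefault sample db).items, (a.setdefault sample db).keys) := by
  by_cases h : a.contains sample = true
  · have hk : sample ∈ a.keys := (PySem.Dict.contains_iff_mem_keys a sample).mp h
    simp [downloadStep, hk, PySem.Dict.setdefault_of_contains a db h]
  · have h' : a.contains sample = false := by simpa using h
    have hk : sample ∉ a.keys := fun hm => h ((PySem.Dict.contains_iff_mem_keys a sample).mpr hm)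
    rw [PySem.Dict.setdefault_of_not_contains a db h',
        PySem.Dict.items_insert_of_not_contains a db h',
        PySem.Dict.keys_insert_of_not_contains a db h']
    simp only [downloadStep, List.contains_eq_mem, hk, decide_false, Bool.false_eq_true, if_false]
    have : groupPass (a.items ++ [(sample, db)])
        = ((groupPass a.items).setdefault db ([] : List String)).modify db []
            (fun l => l ++ [sample]) := by
      simp [groupPass, List.foldl_append]
    rw [this]
    by_cases hc : (groupPass a.items).contains db = true
    · rw [PySem.Dict.setdefault_of_contains _ _ hc, if_pos hc]
    · have hc' : (groupPass a.items).contains db = false := by simpa using hc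
      rw [PySem.Dict.setdefault_of_not_contains _ _ hc', if_neg hc]

-- A's inner loop over one database's sample list tracks B's first pass
theorem inner_eq (db : String) (samples : List String) (a : PySem.Dict String String) :
    samples.foldl (downloadStep db) (groupPass a.items, a.keys)
    = (groupPass ((samples.foldl (fun d s => d.setdefault s db) a)).items,
       (samples.foldl (fun d s => d.setdefault s db) a).keys) := by
  induction samples generalizing a with
  | nil => rfl
  | cons s rest ih =>
      simp only [List.foldl_cons, step_eq]
      exact ih (a.setdefault s db)

-- A's outer loop tracks B's first pass over the whole source list
theorem outer_eq (ss : List (String × List String)) (a : PySem.Dict String String) :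
    ss.foldl (fun st p => p.2.foldl (downloadStep p.1) st) (groupPass a.items, a.keys)
    = (groupPass ((ss.foldl (fun d p => p.2.foldl (fun d s => d.setdefault s p.1) d) a)).items,
       (ss.foldl (fun d p => p.2.foldl (fun d s => d.setdefault s p.1) d) a).keys) := by
  induction ss generalizing a with
  | nil => rfl
  | cons p rest ih =>
      simp only [List.foldl_cons, inner_eq]
      exact ih _

-- ===== VERDICT (by name: the statement is the Claim_ definition above) =====
theorem download_sources_spec : Claim_equal_download_sources := by
  intro ss _
  show download_sources ss = download_sources_alt ss
  have h := outer_eq ss PySem.Dict.empty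
  simp only [download_sources, download_sources_alt, assignPass]
  rw [show ((PySem.Dict.empty : PySem.Dict String (List String)), ([] : List String))
      = (groupPass (PySem.Dict.empty : PySem.Dict String String).items,
         (PySem.Dict.empty : PySem.Dict String String).keys) from rfl, h]
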